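-- pv_equiv track=rewrite | github.com/Bloss321/soduko-solver | ai_sudoku_solver.py | check_duplicate_row
-- ===== SOURCE A (Python) =====
-- def check_duplicate_row(puzzle):
--     duplicate = False
--     for row in range(0, 9):
--         arr = puzzle[row]
--         arr = [x for x in arr if x != 0]
--         if len(arr) != len(set(arr)):
--             duplicate = True
--     return duplicate
-- ===== SOURCE B (Python) =====
-- def check_duplicate_row(puzzle):
--     found = False
--     for i in range(9):
--         vals = sorted(x for x in puzzle[i] if x != 0)
--         for a, b in zip(vals, vals[1:]):
--             if a == b:
--                 found = True
--                 break
--     return found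
-- ===== Notes on version B (the rewrite author's own statement) =====
-- stated objective: alternative
-- what changed: Per row B sorts the nonzero entries and scans adjacent pairs for an equal neighbour (breaking out of the row on the first hit), instead of A's set-construction-and-length-comparison; both keep the index loop over rows 0..8.
import Mathlib
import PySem

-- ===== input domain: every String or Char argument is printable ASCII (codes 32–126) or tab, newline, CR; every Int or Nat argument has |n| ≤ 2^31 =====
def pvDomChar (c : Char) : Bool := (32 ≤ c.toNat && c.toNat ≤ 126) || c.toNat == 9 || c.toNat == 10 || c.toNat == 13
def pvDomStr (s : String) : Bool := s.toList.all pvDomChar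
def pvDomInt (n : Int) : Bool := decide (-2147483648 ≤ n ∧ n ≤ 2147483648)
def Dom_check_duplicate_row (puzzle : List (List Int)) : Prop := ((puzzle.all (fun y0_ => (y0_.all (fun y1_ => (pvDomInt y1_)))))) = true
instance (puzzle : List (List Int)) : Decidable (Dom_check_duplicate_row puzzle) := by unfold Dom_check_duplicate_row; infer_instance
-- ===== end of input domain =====

-- B sorts each row's nonzero entries and scans adjacent pairs with an early return,
-- instead of A's set-length comparison with a flag over all rows (objective: alternative).

-- ===== PORT A =====
def check_duplicate_row (puzzle : List (List Int)) : Bool :=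
  (PySem.List.pyRange 0 9 1).foldl (fun duplicate row =>
    let arr := PySem.List.pyGetD puzzle row []
    let arr := arr.filter (fun x => !(x == 0))
    if arr.length ≠ (PySem.Set.ofList arr).length then true else duplicate) false

-- ===== PORT B =====
-- the inner 'for a, b in zip(vals, vals[1:]): if a == b: return True'
def pvZipScan : List (Int × Int) → Bool
  | [] => false
  | (a, b) :: t => if a == b then true else pvZipScan t

-- body of B's outer loop for one row
def pvRowDup (row : List Int) : Bool :=
  let vals := PySem.List.sorted (row.filter (fun x => !(x == 0))) (fun x => x) false
  pvZipScan (vals.zip vals.tail)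

def check_duplicate_row_alt (puzzle : List (List Int)) : Bool :=
  (PySem.List.pyRange 0 9 1).foldl (fun found i =>
    if pvRowDup (PySem.List.pyGetD puzzle i []) then true else found) false

-- ===== PRECONDITION & SPEC =====
-- A indexes puzzle[0]..puzzle[8], so it raises IndexError on fewer than 9 rows; Pre_ requires 9 rows.
def Pre_check_duplicate_row (puzzle : List (List Int)) : Prop := 9 ≤ puzzle.length
instance (puzzle : List (List Int)) : Decidable (Pre_check_duplicate_row puzzle) := by unfold Pre_check_duplicate_row; infer_instance

def pvWitness_check_duplicate_row : List (List Int) :=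
  [[5, 3], [6], [9, 8], [8], [4], [7], [6], [2, 2], [4, 1, 9]]

def Spec_check_duplicate_row (puzzle : List (List Int)) (out : Bool) : Prop := out = check_duplicate_row_alt puzzle
instance (puzzle : List (List Int)) (out : Bool) : Decidable (Spec_check_duplicate_row puzzle out) := by unfold Spec_check_duplicate_row; infer_instance

-- ===== CLAIM (what is proved, stated in full; the proofs are below) =====
def Claim_equal_check_duplicate_row : Prop := ∀ (puzzle : List (List Int)), Dom_check_duplicate_row puzzle → Pre_check_duplicate_row puzzle → Spec_check_duplicate_row puzzle (check_duplicate_row puzzle)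

-- ===== LEMMAS AND PROOFS =====

-- an if-then-else with Bool value 'true' in the then-branch is a disjunction
theorem pv_ite_or (p : Prop) [Decidable p] (b : Bool) : (if p then true else b) = (decide p || b) := by
  by_cases h : p <;> simp [h]

-- a list's Python-set size equals its length iff it has no duplicates
theorem pv_ofList_length_eq_iff (l : List Int) :
    (PySem.Set.ofList l).length = l.length ↔ l.Nodup := by
  have h1 : (PySem.Set.ofList l).length = l.toFinset.card := by
    rw [← List.toFinset_card_of_nodup (PySem.Set.nodup_ofList l)]
    congr 1
    ext x; simp [PySem.Set.mem_ofList]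
  rw [h1, List.card_toFinset]
  constructor
  · intro h
    rw [← List.dedup_eq_self]
    exact (List.dedup_sublist l).eq_of_length h
  · intro h; rw [List.dedup_eq_self.2 h]

-- on a ≤-sorted list, an equal adjacent pair exists iff the list has a duplicate
theorem pv_zipScan_iff (s : List Int) (hs : s.Pairwise (· ≤ ·)) :
    pvZipScan (s.zip s.tail) = true ↔ ¬ s.Nodup := by
  induction s with
  | nil => simp [pvZipScan]
  | cons a t ih =>
    cases t with
    | nil => simp [pvZipScan]
    | cons b u =>
      rw [List.pairwise_cons] at hs
      obtain ⟨hab, hp⟩ := hs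
      have hab' : a ≤ b := hab b (by simp)
      simp only [List.tail_cons, List.zip_cons_cons, pvZipScan]
      by_cases heq : a = b
      · subst heq
        simp [List.nodup_cons]
      · have hne : (a == b) = false := by simp [heq]
        rw [hne]
        simp only [List.tail_cons] at ih
        simp only [Bool.false_eq_true, if_false]
        rw [ih hp]
        have hnotmem : a ∉ b :: u := by
          intro hm
          rcases List.mem_cons.1 hm with h | h
          · exact heq h
          · have hbu : b ≤ a := (List.pairwise_cons.1 hp).1 a h
            exact heq (le_antisymm hab' hbu)
        simp [List.nodup_cons, hnotmem]

-- per-row: A's set-length test equals B's sorted adjacent scan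
theorem pv_row_eq (r : List Int) :
    (decide ((r.filter (fun x => !(x == 0))).length ≠
      (PySem.Set.ofList (r.filter (fun x => !(x == 0)))).length)) = pvRowDup r := by
  set l := r.filter (fun x => !(x == 0)) with hl
  set s := PySem.List.sorted l (fun x => x) false with hsdef
  have hperm : s.Perm l := PySem.List.sorted_perm l (fun x => x) false
  have hpair : s.Pairwise (· ≤ ·) := PySem.List.sorted_pairwise l (fun x => x)
  have hiff : (l.length ≠ (PySem.Set.ofList l).length) ↔ ¬ l.Nodup := by
    rw [← pv_ofList_length_eq_iff l]
    constructor
    · intro h h'; exact h h'.symm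
    · intro h h'; exact h h'.symm
  have hrw : pvRowDup r = pvZipScan (s.zip s.tail) := rfl
  rw [hrw, Bool.eq_iff_iff]
  simp only [decide_eq_true_iff]
  rw [pv_zipScan_iff s hpair, hperm.nodup_iff]
  exact hiff

-- ===== VERDICT (by name: the statement is the Claim_ definition above) =====
theorem check_duplicate_row_spec : Claim_equal_check_duplicate_row := by
  intro puzzle _ hpre
  unfold Pre_check_duplicate_row at hpre
  unfold Spec_check_duplicate_row
  rcases puzzle with _ | ⟨r0, _ | ⟨r1, _ | ⟨r2, _ | ⟨r3, _ | ⟨r4, _ | ⟨r5, _ | ⟨r6, _ | ⟨r7, _ | ⟨r8, rest⟩⟩⟩⟩⟩⟩⟩⟩⟩ <;>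
    simp only [List.length_cons, List.length_nil] at hpre <;> try omega
  have hr : PySem.List.pyRange 0 9 1 = [0, 1, 2, 3, 4, 5, 6, 7, 8] := by decide
  have h0 : PySem.List.pyGetD (r0::r1::r2::r3::r4::r5::r6::r7::r8::rest) (0 : Int) [] = r0 := by
    rw [PySem.List.pyGetD_ofNat']; simp [List.getD]
  have h1 : PySem.List.pyGetD (r0::r1::r2::r3::r4::r5::r6::r7::r8::rest) (1 : Int) [] = r1 := by
    rw [PySem.List.pyGetD_ofNat']; simp [List.getD]
  have h2 : PySem.List.pyGetD (r0::r1::r2::r3::r4::r5::r6::r7::r8::rest) (2 : Int) [] = r2 := by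
    rw [PySem.List.pyGetD_ofNat']; simp [List.getD]
  have h3 : PySem.List.pyGetD (r0::r1::r2::r3::r4::r5::r6::r7::r8::rest) (3 : Int) [] = r3 := by
    rw [PySem.List.pyGetD_ofNat']; simp [List.getD]
  have h4 : PySem.List.pyGetD (r0::r1::r2::r3::r4::r5::r6::r7::r8::rest) (4 : Int) [] = r4 := by
    rw [PySem.List.pyGetD_ofNat']; simp [List.getD]
  have h5 : PySem.List.pyGetD (r0::r1::r2::r3::r4::r5::r6::r7::r8::rest) (5 : Int) [] = r5 := by
    rw [PySem.List.pyGetD_ofNat']; simp [List.getD]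
  have h6 : PySem.List.pyGetD (r0::r1::r2::r3::r4::r5::r6::r7::r8::rest) (6 : Int) [] = r6 := by
    rw [PySem.List.pyGetD_ofNat']; simp [List.getD]
  have h7 : PySem.List.pyGetD (r0::r1::r2::r3::r4::r5::r6::r7::r8::rest) (7 : Int) [] = r7 := by
    rw [PySem.List.pyGetD_ofNat']; simp [List.getD]
  have h8 : PySem.List.pyGetD (r0::r1::r2::r3::r4::r5::r6::r7::r8::rest) (8 : Int) [] = r8 := by
    rw [PySem.List.pyGetD_ofNat']; simp [List.getD]
  simp only [check_duplicate_row, check_duplicate_row_alt, hr, List.foldl,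
    h0, h1, h2, h3, h4, h5, h6, h7, h8]
  simp only [pv_ite_or, decide_eq_true_eq]
  simp only [pv_row_eq]
  generalize pvRowDup r0 = b0
  generalize pvRowDup r1 = b1
  generalize pvRowDup r2 = b2
  generalize pvRowDup r3 = b3
  generalize pvRowDup r4 = b4
  generalize pvRowDup r5 = b5
  generalize pvRowDup r6 = b6
  generalize pvRowDup r7 = b7
  generalize pvRowDup r8 = b8
  cases b0 <;> cases b1 <;> cases b2 <;> cases b3 <;> cases b4 <;> cases b5 <;> cases b6 <;> cases b7 <;> cases b8 <;> rfl
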